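-- pv_equiv track=rewrite | github.com/sampoll/ridxutils | scripts/order.py | subscripts_for_offset_rmajor
-- ===== SOURCE A (Python) =====
-- def subscripts_for_offset_rmajor(D, off):
--    m = len(D)
--    X = [-1]*m
--    for j in range(m):
--      if j == 0:
--        s = off
--        for i in range(1,m,1):
--          s = s // D[i]
--      elif j == m-1:
--        s = off % D[m-1]
--      else:
--        s = off
--        for i in range(j+1,m,1):
--          s = s // D[i]
--        s = s % D[j]
--      X[j] = s
--    return X
-- ===== SOURCE B (Python) =====
-- def subscripts_for_offset_rmajor(D, off):
--     X = []
--     r = off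
--     for d in reversed(D[1:]):
--         r, x = divmod(r, d)
--         X.append(x)
--     if D:
--         X.append(r)
--     X.reverse()
--     return X
-- ===== Notes on version B (the rewrite author's own statement) =====
-- stated objective: faster
-- what changed: Replaces A's per-index recomputation of the whole suffix division chain (a fresh inner loop for every subscript) by a single right-to-left divmod cascade that threads one running quotient (O(m) divisions instead of O(m^2)).
-- outside the precondition, e.g. on subscripts_for_offset_rmajor([5, 5, -1, 2], -11): A returns [1, 0, 0, 1], B returns [1, 1, 0, 1]
import Mathlib
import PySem

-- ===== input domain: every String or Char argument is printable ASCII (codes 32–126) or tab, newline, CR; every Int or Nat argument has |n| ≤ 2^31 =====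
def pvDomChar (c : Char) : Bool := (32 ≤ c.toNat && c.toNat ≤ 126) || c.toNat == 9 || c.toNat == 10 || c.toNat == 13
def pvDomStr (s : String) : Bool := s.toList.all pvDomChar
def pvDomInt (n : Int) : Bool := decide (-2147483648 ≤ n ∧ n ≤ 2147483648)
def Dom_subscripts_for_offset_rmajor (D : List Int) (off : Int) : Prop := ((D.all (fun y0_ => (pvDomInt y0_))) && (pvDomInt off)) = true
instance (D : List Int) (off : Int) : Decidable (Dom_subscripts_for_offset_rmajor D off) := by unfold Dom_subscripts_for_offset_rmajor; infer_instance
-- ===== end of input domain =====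

-- B replaces A's per-index suffix-division inner loops by one right-to-left divmod cascade: O(m) divisions instead of O(m^2).

-- ===== PORT A =====
-- literal transliteration of Source A: X = [-1]*m, then for each j recompute the whole division chain
def subscripts_for_offset_rmajor (D : List Int) (off : Int) : List Int :=
  let m : Int := (D.length : Int)
  let X : List Int := List.replicate D.length (-1)
  (PySem.List.pyRange 0 m 1).foldl
    (fun X j =>
      let s : Int :=
        if j == 0 then
          (PySem.List.pyRange 1 m 1).foldl
            (fun s i => PySem.Int.floordiv s (PySem.List.pyGetD D i 0)) off
        else if j == m - 1 then
          PySem.Int.mod off (PySem.List.pyGetD D (m - 1) 0)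
        else
          let s := (PySem.List.pyRange (j + 1) m 1).foldl
            (fun s i => PySem.Int.floordiv s (PySem.List.pyGetD D i 0)) off
          PySem.Int.mod s (PySem.List.pyGetD D j 0)
      X.set j.toNat s)  -- X[j] = s (j is always a valid non-negative index here)
    X

-- ===== PORT B =====
-- transliteration of Source B: single pass over reversed(D[1:]) threading (r, X), then append r and reverse
def subscripts_for_offset_rmajor_alt (D : List Int) (off : Int) : List Int :=
  let p : Int × List Int :=
    ((D.drop 1).reverse).foldl
      (fun (p : Int × List Int) d =>
        (PySem.Int.floordiv p.1 d, p.2 ++ [PySem.Int.mod p.1 d]))  -- r, x = divmod(r, d); X.append(x)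
      (off, [])
  let X : List Int := if D.isEmpty then p.2 else p.2 ++ [p.1]
  X.reverse

-- ===== PRECONDITION & SPEC =====
-- Pre_ restricts to the function's natural domain: strictly positive dimension sizes after the
-- first (the first size is never divided by, so it is unconstrained); for lists of length ≤ 2 the
-- division order cannot differ, so there only zero divisors are excluded. A raises
-- ZeroDivisionError on a zero dimension in D[1:], and with ≥ 3 dimensions of which a later one is
-- negative (malformed input for a shape) A's left-to-right chain order yields accidental values.
def Pre_subscripts_for_offset_rmajor (D : List Int) (off : Int) : Prop :=
  (∀ x ∈ D.drop 1, 0 < x) ∨ (D.length ≤ 2 ∧ ∀ x ∈ D.drop 1, x ≠ 0)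
instance (D : List Int) (off : Int) : Decidable (Pre_subscripts_for_offset_rmajor D off) := by unfold Pre_subscripts_for_offset_rmajor; infer_instance
def pvWitness_subscripts_for_offset_rmajor : List Int × Int := ([2, 3, 4], 11)

def Spec_subscripts_for_offset_rmajor (D : List Int) (off : Int) (out : List Int) : Prop := out = subscripts_for_offset_rmajor_alt D off
instance (D : List Int) (off : Int) (out : List Int) : Decidable (Spec_subscripts_for_offset_rmajor D off out) := by unfold Spec_subscripts_for_offset_rmajor; infer_instance

-- ===== CLAIM (what is proved, stated in full; the proofs are below) =====
def Claim_equal_subscripts_for_offset_rmajor : Prop := ∀ (D : List Int) (off : Int), Dom_subscripts_for_offset_rmajor D off → Pre_subscripts_for_offset_rmajor D off → Spec_subscripts_for_offset_rmajor D off (subscripts_for_offset_rmajor D off)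

-- ===== LEMMAS AND PROOFS =====

-- canonical mod list: (mods T x)[i] = (x // prod T[i+1:]) % T[i]
def pvMods : List Int → Int → List Int
  | [], _ => []
  | t :: T, x => PySem.Int.mod (PySem.Int.floordiv x T.prod) t :: pvMods T x

theorem pvMods_length (T : List Int) (x : Int) : (pvMods T x).length = T.length := by
  induction T generalizing x with
  | nil => rfl
  | cons t T ih => simp [pvMods, ih]

theorem pvMods_getElem (T : List Int) (x : Int) (i : Nat) (h : i < T.length) :
    (pvMods T x)[i]'(by simpa [pvMods_length]) =
      PySem.Int.mod (PySem.Int.floordiv x ((T.drop (i + 1)).prod)) (T[i]'h) := by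
  induction T generalizing i with
  | nil => simp at h
  | cons t T ih =>
    cases i with
    | zero => simp [pvMods]
    | succ i => simpa [pvMods] using ih i (by simpa using h)

theorem pv_fdiv_pos (x b : Int) (hb : 0 ≤ b) : Int.fdiv x b = x / b := by
  simp [Int.fdiv_eq_ediv, hb]

theorem pv_fdiv_fdiv (x a b : Int) (ha : 0 < a) (hb : 0 < b) :
    Int.fdiv (Int.fdiv x a) b = Int.fdiv x (a * b) := by
  rw [pv_fdiv_pos _ _ ha.le, pv_fdiv_pos _ _ hb.le,
    pv_fdiv_pos _ _ (by positivity : (0:Int) ≤ a * b)]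
  exact Int.ediv_ediv_of_nonneg ha.le

theorem pv_pyRange_nil (a b : Int) (h : b ≤ a) : PySem.List.pyRange a b 1 = [] := by
  simp [PySem.List.pyRange]; omega

theorem pv_B_fold (T : List Int) (x : Int) (hpos : ∀ d ∈ T, 0 < d) :
    T.reverse.foldl
      (fun (p : Int × List Int) d =>
        (PySem.Int.floordiv p.1 d, p.2 ++ [PySem.Int.mod p.1 d])) (x, []) =
      (PySem.Int.floordiv x T.prod, (pvMods T x).reverse) := by
  induction T with
  | nil => simp [pvMods, PySem.Int.floordiv, Int.fdiv_one]
  | cons t T ih =>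
    have hT : ∀ d ∈ T, 0 < d := fun d hd => hpos d (List.mem_cons_of_mem _ hd)
    rw [List.reverse_cons, List.foldl_append, ih hT]
    have hprod : (0:Int) < T.prod := List.prod_pos hT
    have ht : (0:Int) < t := hpos t List.mem_cons_self
    simp only [List.foldl_cons, List.foldl_nil, pvMods, List.reverse_cons, List.prod_cons]
    refine Prod.ext ?_ rfl
    show Int.fdiv (Int.fdiv x T.prod) t = Int.fdiv x (t * T.prod)
    rw [pv_fdiv_fdiv x T.prod t hprod ht, mul_comm]

theorem pv_B_cons (d : Int) (T : List Int) (off : Int) (hT : ∀ x ∈ T, 0 < x) :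
    subscripts_for_offset_rmajor_alt (d :: T) off =
      PySem.Int.floordiv off T.prod :: pvMods T off := by
  unfold subscripts_for_offset_rmajor_alt
  simp only [List.drop_one, List.tail_cons]
  rw [pv_B_fold T off hT]
  simp

-- A's inner loop: a left-to-right chain of floor divisions over D[a:] equals one division
-- by the product, given positive entries
theorem pv_chain (D : List Int) (hpos : ∀ d ∈ D.drop 1, 0 < d) :
    ∀ (k a : Nat) (x : Int), 1 ≤ a → D.length - a = k →
      (PySem.List.pyRange (a : Int) (D.length : Int) 1).foldl
        (fun s i => PySem.Int.floordiv s (PySem.List.pyGetD D i 0)) x =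
      PySem.Int.floordiv x ((D.drop a).prod) := by
  intro k
  induction k with
  | zero =>
    intro a x _ h
    have ha : D.length ≤ a := by omega
    rw [pv_pyRange_nil _ _ (by exact_mod_cast ha)]
    simp [List.drop_eq_nil_of_le ha, PySem.Int.floordiv, Int.fdiv_one]
  | succ k ih =>
    intro a x ha1 h
    have ha : a < D.length := by omega
    rw [PySem.List.pyRange_one_cons (by exact_mod_cast ha), List.foldl_cons]
    have hget : PySem.List.pyGetD D (a : Int) 0 = D[a] := by
      rw [PySem.List.pyGetD_natCast]; exact List.getD_eq_getElem D 0 ha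
    have hcast : ((a : Int) + 1) = ((a + 1 : Nat) : Int) := by push_cast; ring
    rw [hget, hcast, ih (a + 1) (PySem.Int.floordiv x D[a]) (by omega) (by omega)]
    have hmem : D[a] ∈ D.drop 1 := by
      have hlt : a - 1 < (D.drop 1).length := by simp; omega
      have := List.getElem_mem hlt
      rw [List.getElem_drop] at this
      simpa [show 1 + (a - 1) = a by omega] using this
    have hd : (0:Int) < D[a] := hpos _ hmem
    have hprod : (0:Int) < (D.drop (a+1)).prod := by
      refine List.prod_pos (fun d hd' => hpos d ?_)
      have heq : D.drop (a + 1) = (D.drop 1).drop a := by rw [List.drop_drop]; ring_nf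
      rw [heq] at hd'
      exact List.drop_subset a _ hd'
    show Int.fdiv (Int.fdiv x D[a]) (D.drop (a+1)).prod = Int.fdiv x (D.drop a).prod
    rw [pv_fdiv_fdiv x D[a] _ hd hprod, List.drop_eq_getElem_cons ha, List.prod_cons]

-- A's outer loop: writing g j into slot j for j = 0..k-1 yields map g ++ untouched tail
theorem pv_foldl_set (g : Nat → Int) :
    ∀ (k : Nat) (X : List Int), k ≤ X.length →
      (List.range k).foldl (fun X j => X.set j (g j)) X =
        ((List.range k).map g) ++ X.drop k := by
  intro k
  induction k with
  | zero => intro X _; simp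
  | succ k ih =>
    intro X hk
    rw [List.range_succ, List.foldl_append, List.foldl_cons, List.foldl_nil,
      ih X (by omega), List.map_append]
    have hlt : k < X.length := by omega
    rw [List.set_append]
    simp only [List.length_map, List.length_range, lt_irrefl, if_false, Nat.sub_self]
    rw [List.drop_eq_getElem_cons hlt, List.set_cons_zero]
    simp

theorem pv_A_cons (d : Int) (T : List Int) (off : Int) (hpos : ∀ x ∈ T, 0 < x) :
    subscripts_for_offset_rmajor (d :: T) off =
      PySem.Int.floordiv off T.prod :: pvMods T off := by
  have hgen : ∀ x ∈ (d :: T).drop 1, 0 < x := by simpa using hpos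
  unfold subscripts_for_offset_rmajor
  dsimp only
  rw [PySem.List.pyRange_zero_natCast, List.foldl_map]
  simp only [Int.toNat_natCast]
  rw [pv_foldl_set _ (d :: T).length (List.replicate (d :: T).length (-1)) (by simp)]
  simp only [List.drop_replicate, Nat.sub_self, List.replicate_zero, List.append_nil]
  have hchain := pv_chain (d :: T) hgen
  apply List.ext_getElem
  · simp [pvMods_length]
  · intro i h1 h2
    simp only [List.length_map, List.length_range] at h1
    rw [List.getElem_map, List.getElem_range]
    cases i with
    | zero =>
      simp only [Nat.cast_zero, beq_self_eq_true, if_true, List.getElem_cons_zero]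
      have hc := hchain ((d :: T).length - 1) 1 off (by omega) (by simp)
      norm_num at hc
      simpa using hc
    | succ i =>
      have hi : i < T.length := by simpa using h1
      have hne0 : ((((i + 1 : Nat)) : Int) == 0) = false := by
        simp only [beq_eq_false_iff_ne, ne_eq]; push_cast; omega
      rw [hne0]
      simp only [Bool.false_eq_true, if_false, List.getElem_cons_succ]
      rw [pvMods_getElem T off i hi]
      by_cases hlast : i + 1 = (d :: T).length - 1
      · have hcast : (((i + 1 : Nat)) : Int) == ((d :: T).length : Int) - 1 := by
          simp only [beq_iff_eq]; push_cast; omega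
        rw [if_pos hcast]
        have hc2 : ((d :: T).length : Int) - 1 = (((i + 1 : Nat)) : Int) := by
          push_cast; omega
        rw [hc2, PySem.List.pyGetD_natCast]
        rw [List.getD_eq_getElem _ 0 (by simpa using hi), List.getElem_cons_succ]
        have hdrop : T.drop (i + 1) = [] := List.drop_eq_nil_of_le (by simp at hlast; omega)
        rw [hdrop]
        simp [PySem.Int.floordiv, Int.fdiv_one]
      · have hcast : ((((i + 1 : Nat)) : Int) == ((d :: T).length : Int) - 1) = false := by
          simp only [beq_eq_false_iff_ne, ne_eq]
          intro hcontra
          apply hlast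
          have : ((i + 1 : Nat) : Int) = ((d :: T).length : Int) - 1 := hcontra
          push_cast at this; omega
        rw [hcast]
        simp only [Bool.false_eq_true, if_false]
        have hc3 : (((i + 1 : Nat)) : Int) + 1 = (((i + 2 : Nat)) : Int) := by push_cast; ring
        rw [hc3, hchain ((d :: T).length - (i + 2)) (i + 2) off (by omega) (by simp)]
        rw [PySem.List.pyGetD_natCast, List.getD_eq_getElem _ 0 (by simpa using hi),
          List.getElem_cons_succ]
        show PySem.Int.mod (PySem.Int.floordiv off ((d :: T).drop (i + 2)).prod) T[i] = _
        rfl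

-- ===== VERDICT (by name: the statement is the Claim_ definition above) =====
theorem subscripts_for_offset_rmajor_spec : Claim_equal_subscripts_for_offset_rmajor := by
  intro D off _ hpre
  unfold Spec_subscripts_for_offset_rmajor
  match D with
  | [] => rfl
  | [d0] =>
    simp [subscripts_for_offset_rmajor, subscripts_for_offset_rmajor_alt,
      PySem.List.pyRange, PySem.List.pyGetD, PySem.Int.floordiv, PySem.Int.mod]
  | [d0, d1] =>
    simp [subscripts_for_offset_rmajor, subscripts_for_offset_rmajor_alt, List.range_succ,
      PySem.List.pyRange, PySem.List.pyGetD, PySem.Int.floordiv, PySem.Int.mod]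
  | d0 :: d1 :: d2 :: R =>
    have hT : ∀ x ∈ d1 :: d2 :: R, 0 < x := by
      rcases hpre with h | ⟨hlen, _⟩
      · simpa using h
      · simp at hlen
    rw [pv_A_cons d0 _ off hT, pv_B_cons d0 _ off hT]
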